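-- pv_equiv track=rewrite | github.com/YashB63/GFG-Daily-Questions | Day 403/Valid Compressed String/valid_compressed_string.py | checkCompressed
-- ===== SOURCE A (Python) =====
-- def checkCompressed(S, T):
--     lenS = len(S)
--     position = 0
--     i = 0
--     while i < len(T):
--
--         char = ""
--         if T[i].isdigit():
--
--             while i < len(T) and T[i].isdigit():
--                 char += T[i]
--                 i += 1
--
--             position += int(char)
--             if position > lenS:
--                 return 0
--         else:
--             if T[i] != S[position]:
--                 return 0
--             i += 1
--             position += 1
--
--     return int(position == lenS)
-- ===== SOURCE B (Python) =====
-- def checkCompressed(S, T):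
--     # Pass 1: tokenize T into ('num', digit-run) and ('lit', char) tokens.
--     tokens = []
--     i = 0
--     n = len(T)
--     while i < n:
--         if T[i].isdigit():
--             j = i
--             while j < n and T[j].isdigit():
--                 j += 1
--             tokens.append(('num', T[i:j]))
--             i = j
--         else:
--             tokens.append(('lit', T[i]))
--             i += 1
--     # Pass 2: match the tokens against S.
--     lenS = len(S)
--     position = 0
--     for kind, tok in tokens:
--         if kind == 'num':
--             position += int(tok)
--             if position > lenS:
--                 return 0
--         else:
--             if tok != S[position]:
--                 return 0
--             position += 1
--     return int(position == lenS)
-- ===== Notes on version B (the rewrite author's own statement) =====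
-- stated objective: alternative
-- what changed: A's single fused scan of T (with an inner digit-gathering while loop interleaved with matching) is replaced by a two-phase decomposition: first tokenize T into digit-run and literal tokens, then a separate loop matches the token list against S.
import Mathlib
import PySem

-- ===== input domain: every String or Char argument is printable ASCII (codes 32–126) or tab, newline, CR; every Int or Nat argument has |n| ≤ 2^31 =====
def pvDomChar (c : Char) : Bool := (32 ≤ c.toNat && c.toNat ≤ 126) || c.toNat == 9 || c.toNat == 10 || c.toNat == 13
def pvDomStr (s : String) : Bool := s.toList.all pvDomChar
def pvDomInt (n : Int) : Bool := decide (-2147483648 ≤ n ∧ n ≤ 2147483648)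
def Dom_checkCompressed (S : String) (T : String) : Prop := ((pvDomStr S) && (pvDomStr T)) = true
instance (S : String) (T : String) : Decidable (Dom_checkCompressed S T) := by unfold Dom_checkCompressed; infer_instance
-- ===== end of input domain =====

-- B replaces A's single fused scan by a tokenize-then-match decomposition (objective: alternative, same cost).

-- ===== PORT A =====

-- inner `while i < len(T) and T[i].isdigit(): char += T[i]; i += 1`
def pvGrab : List Char → List Char → (List Char × List Char)
  | [], acc => (acc, [])
  | c :: cs, acc => if PySem.Chars.isdigit c then pvGrab cs (acc ++ [c]) else (acc, c :: cs)

theorem pvGrab_eq (l acc : List Char) :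
    pvGrab l acc = (acc ++ l.takeWhile PySem.Chars.isdigit, l.dropWhile PySem.Chars.isdigit) := by
  induction l generalizing acc with
  | nil => simp [pvGrab]
  | cons c cs ih =>
    by_cases h : PySem.Chars.isdigit c <;> simp [pvGrab, h, ih]

-- the outer while loop of A; `none` = IndexError at S[position]
def pvALoop (S : List Char) (lenS : Int) : List Char → Int → Option Int
  | [], pos => some (if pos = lenS then 1 else 0)
  | c :: cs, pos =>
    if PySem.Chars.isdigit c then
      let g := pvGrab (c :: cs) []
      -- int(char) never fails here: char is a nonempty run of ASCII digits
      let pos' := pos + (PySem.Int.ofChars? g.1).getD 0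
      if pos' > lenS then some 0 else pvALoop S lenS g.2 pos'
    else
      match PySem.List.pyGet? S pos with
      | none => none
      | some s => if c ≠ s then some 0 else pvALoop S lenS cs (pos + 1)
  termination_by l _ => l.length
  decreasing_by
  · simp only [pvGrab_eq, List.dropWhile_cons, *]
    have := List.length_dropWhile_le (p := PySem.Chars.isdigit) (l := cs)
    simpa using Nat.lt_succ_of_le this
  · simp

def checkCompressed (S : String) (T : String) : Int :=
  (pvALoop S.toList (S.toList.length : Int) T.toList 0).getD 0

-- ===== PORT B =====

inductive pvTok
  | num : List Char → pvTok
  | lit : Char → pvTok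
deriving DecidableEq, Repr

-- pass 1 of B: tokenize T
def pvTokenize : List Char → List pvTok
  | [] => []
  | c :: cs =>
    if PySem.Chars.isdigit c then
      pvTok.num ((c :: cs).takeWhile PySem.Chars.isdigit) ::
        pvTokenize ((c :: cs).dropWhile PySem.Chars.isdigit)
    else
      pvTok.lit c :: pvTokenize cs
  termination_by l => l.length
  decreasing_by
  · simp only [List.dropWhile_cons, *]
    have := List.length_dropWhile_le (p := PySem.Chars.isdigit) (l := cs)
    simpa using Nat.lt_succ_of_le this
  · simp

-- pass 2 of B: match the tokens against S; `none` = IndexError at S[position]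
def pvBLoop (S : List Char) (lenS : Int) : List pvTok → Int → Option Int
  | [], pos => some (if pos = lenS then 1 else 0)
  | pvTok.num t :: rest, pos =>
    let pos' := pos + (PySem.Int.ofChars? t).getD 0
    if pos' > lenS then some 0 else pvBLoop S lenS rest pos'
  | pvTok.lit c :: rest, pos =>
    match PySem.List.pyGet? S pos with
    | none => none
    | some s => if c ≠ s then some 0 else pvBLoop S lenS rest (pos + 1)

def checkCompressed_alt (S : String) (T : String) : Int :=
  (pvBLoop S.toList (S.toList.length : Int) (pvTokenize T.toList) 0).getD 0

-- ===== PRECONDITION & SPEC =====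

-- Pre_ helpers (closed-form over the input; they do not call either port).
-- pvRuns groups T's maximal digit runs (structural right fold, so `decide` can evaluate it).
def pvRuns : List Char → List (List Char ⊕ Char)
  | [] => []
  | c :: cs =>
    let r := pvRuns cs
    if PySem.Chars.isdigit c then
      match r with
      | Sum.inl run :: r' => Sum.inl (c :: run) :: r'
      | _ => Sum.inl [c] :: r
    else
      Sum.inr c :: r

def pvPreToks (l : List Char) : List (Int ⊕ Char) :=
  (pvRuns l).map (fun t => match t with
    | Sum.inl run => Sum.inl ((PySem.Int.ofChars? run).getD 0)
    | Sum.inr c => Sum.inr c)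

def pvWeight : Int ⊕ Char → Int
  | Sum.inl n => n
  | Sum.inr _ => 1

-- position of A after the first k tokens (a prefix sum of the input's token weights)
def pvPsum (toks : List (Int ⊕ Char)) (k : Nat) : Int := ((toks.take k).map pvWeight).sum

-- token j passes A's check without returning 0 or raising
def pvTokOk (S : List Char) (lenS : Int) (toks : List (Int ⊕ Char)) (j : Nat) : Bool :=
  match toks[j]? with
  | some (Sum.inl _) => decide (pvPsum toks (j + 1) ≤ lenS)
  | some (Sum.inr c) => decide (pvPsum toks j < lenS) && (PySem.List.pyGet? S (pvPsum toks j) == some c)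
  | none => true

-- A raises IndexError exactly when some literal token k is reached (all earlier tokens pass)
-- with S already fully consumed (position = len S).
def pvRaisesAt (S : List Char) (lenS : Int) (toks : List (Int ⊕ Char)) (k : Nat) : Bool :=
  (match toks[k]? with | some (Sum.inr _) => true | _ => false)
    && decide (pvPsum toks k = lenS)
    && (List.range k).all (pvTokOk S lenS toks)

-- Pre_ excludes exactly the inputs on which A raises IndexError (a literal in T reached after
-- S is fully consumed); Python B raises the same IndexError there.
def Pre_checkCompressed (S : String) (T : String) : Prop :=
  (List.range (pvPreToks T.toList).length).all
    (fun k => !(pvRaisesAt S.toList (S.toList.length : Int) (pvPreToks T.toList) k)) = true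

instance (S : String) (T : String) : Decidable (Pre_checkCompressed S T) := by
  unfold Pre_checkCompressed; infer_instance

def pvWitness_checkCompressed : String × String := ("a", "a")

def Spec_checkCompressed (S : String) (T : String) (out : Int) : Prop := out = checkCompressed_alt S T
instance (S : String) (T : String) (out : Int) : Decidable (Spec_checkCompressed S T out) := by unfold Spec_checkCompressed; infer_instance

-- ===== CLAIM (what is proved, stated in full; the proofs are below) =====
def Claim_equal_checkCompressed : Prop := ∀ (S : String) (T : String), Dom_checkCompressed S T → Pre_checkCompressed S T → Spec_checkCompressed S T (checkCompressed S T)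

-- ===== LEMMAS AND PROOFS =====

-- A's fused loop equals B's second loop over B's tokenization, for every state
theorem pvLoop_eq (S : List Char) (lenS : Int) :
    ∀ (n : Nat) (cs : List Char), cs.length ≤ n → ∀ pos : Int,
      pvALoop S lenS cs pos = pvBLoop S lenS (pvTokenize cs) pos := by
  intro n
  induction n with
  | zero =>
    intro cs h pos
    have : cs = [] := List.length_eq_zero_iff.mp (Nat.le_zero.mp h)
    subst this
    simp [pvALoop, pvTokenize, pvBLoop]
  | succ n ih =>
    intro cs h pos
    match cs with
    | [] => simp [pvALoop, pvTokenize, pvBLoop]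
    | c :: cs' =>
      by_cases hd : PySem.Chars.isdigit c
      · rw [pvALoop, pvTokenize, if_pos hd, if_pos hd, pvBLoop]
        simp only [pvGrab_eq, List.nil_append]
        have hlen : ((c :: cs').dropWhile PySem.Chars.isdigit).length ≤ n := by
          simp only [List.dropWhile_cons, hd, if_pos]
          have h1 := List.length_dropWhile_le (p := PySem.Chars.isdigit) (l := cs')
          have h2 : cs'.length ≤ n := by simpa using h
          omega
        split
        · rfl
        · exact ih _ hlen _
      · rw [pvALoop, pvTokenize, if_neg hd, if_neg hd, pvBLoop]
        have hlen : cs'.length ≤ n := by simpa using h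
        cases PySem.List.pyGet? S pos with
        | none => rfl
        | some s =>
          by_cases hc : c ≠ s
          · simp [hc]
          · simp only [hc, ite_false]
            simpa [hc] using ih _ hlen (pos + 1)

-- ===== VERDICT (by name: the statement is the Claim_ definition above) =====
theorem checkCompressed_spec : Claim_equal_checkCompressed := by
  intro S T _ _
  unfold Spec_checkCompressed checkCompressed checkCompressed_alt
  rw [pvLoop_eq S.toList _ T.toList.length T.toList (le_refl _) 0]
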